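-- pv_equiv track=rewrite | github.com/tagoyal/sow-reap-paraphrasing | processing/convert_hdf5_rules.py | get_new_reordering
-- ===== SOURCE A (Python) =====
-- def get_new_reordering(order, toks, bpe_toks):
--     bpe_idx = 0
--     order_new = []
--     for tok_idx, tok in enumerate(toks):
--         try:
--             bpe_curr = bpe_toks[bpe_idx].split("@@")[0]
--             assert tok.startswith(bpe_curr), "bpe doesn't split at spaces"
--             current = bpe_curr
--             order_new.append(order[tok_idx])
--             while current != tok:
--                 order_new.append(order[tok_idx])
--                 bpe_idx += 1
--                 bpe_curr = bpe_toks[bpe_idx].split("@@")[0]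
--                 current = current + bpe_curr
--             bpe_idx += 1
--         except:
--             return None
--
--     return order_new
-- ===== SOURCE B (Python) =====
-- def get_new_reordering(order, toks, bpe_toks):
--     # Staged plan: strip '@@' from every piece once, segment words by pure length
--     # arithmetic (no string accumulation), verify all segments with one global join
--     # comparison, then emit the answer by repetition over zip(order, counts).
--     if len(order) < len(toks):
--         return None
--     pieces = [b.split("@@")[0] for b in bpe_toks]
--     counts = []
--     j = 0
--     for tok in toks:
--         need = len(tok)
--         k = 0
--         while k == 0 or need > 0:
--             if j >= len(pieces):
--                 return None
--             need -= len(pieces[j])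
--             j += 1
--             k += 1
--         if need != 0:
--             return None
--         counts.append(k)
--     if "".join(pieces[:j]) != "".join(toks):
--         return None
--     return [o for o, k in zip(order, counts) for _ in range(k)]
-- ===== Notes on version B (the rewrite author's own statement) =====
-- stated objective: alternative
-- what changed: Instead of accumulating subword strings per word, B strips all pieces once, segments each word by pure length arithmetic (no string comparisons in the loop), verifies all segments with a single global join comparison at the end, and emits the result by repetition over zip(order, counts).
import Mathlib
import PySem

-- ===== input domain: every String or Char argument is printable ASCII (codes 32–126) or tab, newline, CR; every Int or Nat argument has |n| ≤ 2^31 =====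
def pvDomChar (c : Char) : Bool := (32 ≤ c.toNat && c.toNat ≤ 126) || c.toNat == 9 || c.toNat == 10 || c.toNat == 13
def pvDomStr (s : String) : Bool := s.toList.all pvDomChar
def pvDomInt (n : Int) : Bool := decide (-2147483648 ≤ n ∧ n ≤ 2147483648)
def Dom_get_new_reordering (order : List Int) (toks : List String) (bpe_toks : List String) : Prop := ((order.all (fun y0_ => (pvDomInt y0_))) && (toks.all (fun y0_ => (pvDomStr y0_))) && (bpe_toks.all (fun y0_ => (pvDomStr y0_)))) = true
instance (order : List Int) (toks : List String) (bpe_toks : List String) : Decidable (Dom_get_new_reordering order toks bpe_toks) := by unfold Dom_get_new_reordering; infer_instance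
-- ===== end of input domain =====

-- B replaces A's per-word string accumulation by a staged plan: strip pieces once, segment
-- each word by length arithmetic, verify with one global join comparison, emit by repetition.

-- ===== PORT A =====

-- s.split("@@")[0]  (split never returns an empty list, so [0] never raises)
def pvStrip (s : String) : List Char := (PySem.Chars.splitOn s.toList ['@','@']).headD []

-- the inner 'while current != tok' loop of A; returns (bpe_idx after the final +=1, order_new)
def pvAWhile (order : List Int) (bpe_toks : List String) (tok : List Char) (tok_idx : Nat)
    (current : List Char) (j : Nat) (acc : List Int) : Option (Nat × List Int) :=
  if current = tok then some (j, acc)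
  else
    match PySem.List.pyGet? order (tok_idx : Int) with
    | none => none
    | some o =>
      match h : PySem.List.pyGet? bpe_toks (j : Int) with
      | none => none
      | some s => pvAWhile order bpe_toks tok tok_idx (current ++ pvStrip s) (j + 1) (acc ++ [o])
termination_by bpe_toks.length - j
decreasing_by
  simp only [PySem.List.pyGet?_natCast] at h
  have hlt := (List.getElem?_eq_some_iff.mp h).1
  omega

-- the 'for tok_idx, tok in enumerate(toks)' loop of A
def pvAOuter (order : List Int) (bpe_toks : List String) :
    List String → Nat → Nat → List Int → Option (List Int)
  | [], _, _, acc => some acc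
  | tok :: rest, tok_idx, j, acc =>
    match PySem.List.pyGet? bpe_toks (j : Int) with
    | none => none
    | some s =>
      if PySem.Chars.startswith tok.toList (pvStrip s) then
        match PySem.List.pyGet? order (tok_idx : Int) with
        | none => none
        | some o =>
          match pvAWhile order bpe_toks tok.toList tok_idx (pvStrip s) (j + 1) (acc ++ [o]) with
          | none => none
          | some (j', acc') => pvAOuter order bpe_toks rest (tok_idx + 1) j' acc'
      else none

def get_new_reordering (order : List Int) (toks : List String) (bpe_toks : List String) : Option (List Int) :=
  pvAOuter order bpe_toks toks 0 0 []

-- ===== PORT B =====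

-- B's per-word length-arithmetic segmentation ('while k == 0 or need > 0'); returns (j, k)
def pvSeg (pieces : List (List Char)) (j : Nat) (need : Int) (k : Nat) : Option (Nat × Nat) :=
  if k = 0 ∨ 0 < need then
    match h : pieces[j]? with        -- 'if j >= len(pieces): return None' then 'pieces[j]'
    | none => none
    | some p => pvSeg pieces (j + 1) (need - p.length) (k + 1)
  else if need = 0 then some (j, k) else none
termination_by pieces.length - j
decreasing_by
  have hlt := (List.getElem?_eq_some_iff.mp h).1
  omega

-- B's 'for tok in toks' loop collecting counts
def pvBOuter (pieces : List (List Char)) : List String → Nat → List Nat → Option (List Nat × Nat)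
  | [], j, counts => some (counts, j)
  | tok :: rest, j, counts =>
    match pvSeg pieces j (tok.toList.length : Int) 0 with
    | none => none
    | some (j', k) => pvBOuter pieces rest j' (counts ++ [k])

def get_new_reordering_alt (order : List Int) (toks : List String) (bpe_toks : List String) : Option (List Int) :=
  if order.length < toks.length then none
  else
    let pieces := bpe_toks.map pvStrip
    match pvBOuter pieces toks 0 [] with
    | none => none
    | some (counts, j) =>
      -- "".join(pieces[:j]) == "".join(toks)  (ASCII join = concatenation of char lists)
      if (pieces.take j).flatten = (toks.map String.toList).flatten then
        some ((order.zip counts).flatMap (fun p => List.replicate p.2 p.1))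
      else none

-- ===== PRECONDITION & SPEC =====
def Spec_get_new_reordering (order : List Int) (toks : List String) (bpe_toks : List String) (out : Option (List Int)) : Prop := out = get_new_reordering_alt order toks bpe_toks
instance (order : List Int) (toks : List String) (bpe_toks : List String) (out : Option (List Int)) : Decidable (Spec_get_new_reordering order toks bpe_toks out) := by unfold Spec_get_new_reordering; infer_instance

-- ===== CLAIM (what is proved, stated in full; the proofs are below) =====
def Claim_equal_get_new_reordering : Prop := ∀ (order : List Int) (toks : List String) (bpe_toks : List String), Dom_get_new_reordering order toks bpe_toks → Spec_get_new_reordering order toks bpe_toks (get_new_reordering order toks bpe_toks)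

-- ===== LEMMAS AND PROOFS =====

-- one-step unfolding of pvAWhile with the matches as Option.bind (proof-side convenience)
theorem pvAWhile_eq (order : List Int) (bpe_toks : List String) (tok : List Char) (tok_idx : Nat)
    (current : List Char) (j : Nat) (acc : List Int) :
    pvAWhile order bpe_toks tok tok_idx current j acc =
      if current = tok then some (j, acc)
      else
        (PySem.List.pyGet? order (tok_idx : Int)).bind fun o =>
          (PySem.List.pyGet? bpe_toks (j : Int)).bind fun s =>
            pvAWhile order bpe_toks tok tok_idx (current ++ pvStrip s) (j + 1) (acc ++ [o]) := by
  rw [pvAWhile]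
  by_cases hct : current = tok
  · simp [hct]
  · simp only [if_neg hct]
    cases PySem.List.pyGet? order (tok_idx : Int) <;>
      cases PySem.List.pyGet? bpe_toks (j : Int) <;> simp

-- an index at or past the end raises
theorem pvGet_none (bpe_toks : List String) (j : Nat) (hlen : bpe_toks.length ≤ j) :
    PySem.List.pyGet? bpe_toks (j : Int) = none := by
  simp only [PySem.List.pyGet?_natCast]
  exact List.getElem?_eq_none hlen

-- once the accumulated string is not a prefix of the word, A's while loop can only fail
theorem pvAWhile_none (order : List Int) (bpe_toks : List String) (tok : List Char) (tok_idx : Nat) :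
    ∀ (n j : Nat) (current : List Char) (acc : List Int), bpe_toks.length ≤ j + n →
      ¬ current <+: tok →
      pvAWhile order bpe_toks tok tok_idx current j acc = none := by
  intro n
  induction n with
  | zero =>
    intro j current acc hlen hpre
    have hct : current ≠ tok := fun e => hpre (e ▸ List.prefix_refl _)
    rw [pvAWhile_eq, if_neg hct]
    cases ho : PySem.List.pyGet? order (tok_idx : Int) <;>
      simp [pvGet_none bpe_toks j (by omega)]
  | succ n ih =>
    intro j current acc hlen hpre
    have hct : current ≠ tok := fun e => hpre (e ▸ List.prefix_refl _)
    rw [pvAWhile_eq, if_neg hct]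
    cases ho : PySem.List.pyGet? order (tok_idx : Int) with
    | none => simp
    | some o =>
      cases hb : PySem.List.pyGet? bpe_toks (j : Int) with
      | none => simp
      | some s =>
        simp only [Option.bind_some]
        exact ih (j + 1) (current ++ pvStrip s) (acc ++ [o]) (by omega)
          (fun hp => hpre ((List.prefix_append current (pvStrip s)).trans hp))

-- structural facts about a successful segmentation
theorem pvSeg_facts (pieces : List (List Char)) (j : Nat) (need : Int) (k : Nat) :
    ∀ (j' k' : Nat), pvSeg pieces j need k = some (j', k') →
      k ≤ k' ∧ j' = j + (k' - k) ∧ (k < k' → j' ≤ pieces.length) ∧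
        need = (((pieces.drop j).take (k' - k)).flatten.length : Int) := by
  induction j, need, k using pvSeg.induct pieces with
  | case1 j need k hc hn =>
    intro j' k' h
    rw [pvSeg, if_pos hc, hn] at h
    exact absurd h (by simp)
  | case2 j need k hc p hp ih =>
    intro j' k' h
    rw [pvSeg, if_pos hc, hp] at h
    obtain ⟨h1, h2, h3, h4⟩ := ih j' k' h
    have hjlt : j < pieces.length := (List.getElem?_eq_some_iff.mp hp).1
    have hdrop : pieces.drop j = p :: pieces.drop (j + 1) := by
      rw [List.drop_eq_getElem_cons hjlt]
      have := (List.getElem?_eq_some_iff.mp hp).2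
      rw [this]
    refine ⟨by omega, by omega, ?_, ?_⟩
    · intro _
      by_cases hk : k + 1 < k'
      · exact h3 hk
      · omega
    · have hkk : k' - k = (k' - (k + 1)) + 1 := by omega
      rw [hkk, hdrop, List.take_succ_cons, List.flatten_cons, List.length_append]
      push_cast
      omega
  | case3 j k hc =>
    intro j' k' h
    rw [pvSeg, if_neg hc, if_pos rfl] at h
    obtain ⟨rfl, rfl⟩ : j = j' ∧ k = k' := by
      have := Option.some.inj h
      exact ⟨congrArg Prod.fst this, congrArg Prod.snd this⟩
    simp
  | case4 j need k hc hz =>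
    intro j' k' h
    rw [pvSeg, if_neg hc, if_neg hz] at h
    exact absurd h (by simp)

-- counts accumulator of pvBOuter
theorem pvBOuter_acc (pieces : List (List Char)) :
    ∀ (rest : List String) (j : Nat) (c : List Nat),
      pvBOuter pieces rest j c = (pvBOuter pieces rest j []).map (fun p => (c ++ p.1, p.2)) := by
  intro rest
  induction rest with
  | nil => intro j c; simp [pvBOuter]
  | cons tok rest ih =>
    intro j c
    simp only [pvBOuter]
    cases pvSeg pieces j (tok.toList.length : Int) 0 with
    | none => simp
    | some p =>
      obtain ⟨j1, k⟩ := p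
      simp only
      rw [ih j1 (c ++ [k]), ih j1 ([] ++ [k])]
      cases pvBOuter pieces rest j1 [] <;> simp

-- pvBOuter only moves the piece index forward
theorem pvBOuter_mono (pieces : List (List Char)) :
    ∀ (rest : List String) (j : Nat) (c : List Nat) (cs : List Nat) (j' : Nat),
      pvBOuter pieces rest j c = some (cs, j') → j ≤ j' := by
  intro rest
  induction rest with
  | nil =>
    intro j c cs j' h
    simp only [pvBOuter, Option.some.injEq, Prod.mk.injEq] at h
    omega
  | cons tok rest ih =>
    intro j c cs j' h
    simp only [pvBOuter] at h
    cases hs : pvSeg pieces j (tok.toList.length : Int) 0 with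
    | none => rw [hs] at h; exact absurd h (by simp)
    | some p =>
      obtain ⟨j1, k⟩ := p
      rw [hs] at h
      obtain ⟨h1, h2, -, -⟩ := pvSeg_facts pieces j _ 0 j1 k hs
      have := ih j1 (c ++ [k]) cs j' h
      omega

-- A's inner while, lock-stepped against B's length segmentation
theorem pvAWhile_vs_pvSeg (order : List Int) (bpe_toks : List String) (tokL : List Char)
    (ti : Nat) (o : Int) (ho : PySem.List.pyGet? order (ti : Int) = some o) (j0 : Nat) :
    ∀ (n j' k : Nat) (cur : List Char) (acc0 : List Int),
      (bpe_toks.map pvStrip).length ≤ j' + n → 1 ≤ k →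
      cur = (((bpe_toks.map pvStrip).drop j0).take k).flatten → j' = j0 + k →
      (∀ m, 1 ≤ m → m < k → (((bpe_toks.map pvStrip).drop j0).take m).flatten ≠ tokL) →
      pvAWhile order bpe_toks tokL ti cur j' (acc0 ++ List.replicate k o) =
        match pvSeg (bpe_toks.map pvStrip) j' ((tokL.length : Int) - (cur.length : Int)) k with
        | none => none
        | some (j'', k') =>
          if (((bpe_toks.map pvStrip).drop j0).take k').flatten = tokL
          then some (j'', acc0 ++ List.replicate k' o)
          else none := by
  intro n
  induction n with
  | zero =>
    intro j' k cur acc0 hbound hk hcur hj hinv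
    by_cases hct : cur = tokL
    · have hneed : (tokL.length : Int) - (cur.length : Int) = 0 := by rw [hct]; ring
      rw [pvAWhile_eq, if_pos hct, hneed, pvSeg, if_neg (by omega), if_pos rfl]
      show some (j', acc0 ++ List.replicate k o) =
        if (((bpe_toks.map pvStrip).drop j0).take k).flatten = tokL
        then some (j', acc0 ++ List.replicate k o) else none
      rw [← hcur, if_pos hct]
    · by_cases hlt : cur.length < tokL.length
      · -- need > 0: both sides try to read piece j', which is out of range
        have hp : (bpe_toks.map pvStrip)[j']? = none := List.getElem?_eq_none (by omega)
        have hb : PySem.List.pyGet? bpe_toks (j' : Int) = none :=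
          pvGet_none bpe_toks j' (by simpa using hbound)
        rw [pvAWhile_eq, if_neg hct, ho, Option.bind_some, hb, pvSeg,
          if_pos (by right; omega), hp]
        rfl
      · -- need ≤ 0 and cur ≠ tokL: A's loop can never succeed
        have hpre : ¬ cur <+: tokL := by
          intro hp
          exact hct (hp.eq_of_length (by have := hp.length_le; omega))
        rw [pvAWhile_none order bpe_toks tokL ti bpe_toks.length j' cur _ (by omega) hpre,
          pvSeg, if_neg (by omega)]
        by_cases hz : (tokL.length : Int) - (cur.length : Int) = 0
        · rw [if_pos hz]
          show none =
            if (((bpe_toks.map pvStrip).drop j0).take k).flatten = tokL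
            then some (j', acc0 ++ List.replicate k o) else none
          rw [← hcur, if_neg hct]
        · rw [if_neg hz]
  | succ n ih =>
    intro j' k cur acc0 hbound hk hcur hj hinv
    by_cases hct : cur = tokL
    · have hneed : (tokL.length : Int) - (cur.length : Int) = 0 := by rw [hct]; ring
      rw [pvAWhile_eq, if_pos hct, hneed, pvSeg, if_neg (by omega), if_pos rfl]
      show some (j', acc0 ++ List.replicate k o) =
        if (((bpe_toks.map pvStrip).drop j0).take k).flatten = tokL
        then some (j', acc0 ++ List.replicate k o) else none
      rw [← hcur, if_pos hct]
    · by_cases hlt : cur.length < tokL.length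
      · rw [pvAWhile_eq, if_neg hct, ho, Option.bind_some]
        cases hp : (bpe_toks.map pvStrip)[j']? with
        | none =>
          have hb : PySem.List.pyGet? bpe_toks (j' : Int) = none :=
            pvGet_none bpe_toks j' (by simpa using List.getElem?_eq_none_iff.mp hp)
          rw [hb, pvSeg, if_pos (by right; omega), hp]
          rfl
        | some p =>
          have hjlt : j' < bpe_toks.length := by
            have := (List.getElem?_eq_some_iff.mp hp).1; simpa using this
          have hb : PySem.List.pyGet? bpe_toks (j' : Int) = some bpe_toks[j'] := by
            simp [PySem.List.pyGet?_natCast, List.getElem?_eq_getElem hjlt]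
          have hps : p = pvStrip bpe_toks[j'] := by
            have := (List.getElem?_eq_some_iff.mp hp).2
            simpa using this.symm
          rw [hb, Option.bind_some]
          have hrep : acc0 ++ List.replicate k o ++ [o] = acc0 ++ List.replicate (k + 1) o := by
            rw [List.replicate_succ', List.append_assoc]
          have hcur' : cur ++ pvStrip bpe_toks[j'] =
              (((bpe_toks.map pvStrip).drop j0).take (k + 1)).flatten := by
            have hk' : ((bpe_toks.map pvStrip).drop j0)[k]? = some (pvStrip bpe_toks[j']) := by
              rw [List.getElem?_drop, ← hj, ← hps]
              exact hp
            rw [List.take_succ, hk', List.flatten_append, ← hcur]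
            simp
          have hinv' : ∀ m, 1 ≤ m → m < k + 1 →
              (((bpe_toks.map pvStrip).drop j0).take m).flatten ≠ tokL := by
            intro m h1 h2
            by_cases hm : m = k
            · rw [hm, ← hcur]; exact hct
            · exact hinv m h1 (by omega)
          have hseg : pvSeg (bpe_toks.map pvStrip) j' ((tokL.length : Int) - (cur.length : Int)) k
              = pvSeg (bpe_toks.map pvStrip) (j' + 1)
                  (((tokL.length : Int) - (cur.length : Int)) - ((pvStrip bpe_toks[j']).length : Int)) (k + 1) := by
            rw [pvSeg, if_pos (by right; omega), hp, hps]
          rw [hseg, hrep, hcur']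
          rw [ih (j' + 1) (k + 1) _ acc0 (by omega) (by omega) rfl (by omega) hinv']
          have hneed2 : (tokL.length : Int) - (((((bpe_toks.map pvStrip)).drop j0).take (k + 1)).flatten.length : Int)
              = ((tokL.length : Int) - (cur.length : Int)) - ((pvStrip bpe_toks[j']).length : Int) := by
            rw [← hcur', List.length_append]; push_cast; ring
          rw [hneed2]
      · have hpre : ¬ cur <+: tokL := by
          intro hp
          exact hct (hp.eq_of_length (by have := hp.length_le; omega))
        rw [pvAWhile_none order bpe_toks tokL ti bpe_toks.length j' cur _ (by omega) hpre,
          pvSeg, if_neg (by omega)]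
        by_cases hz : (tokL.length : Int) - (cur.length : Int) = 0
        · rw [if_pos hz]
          show none =
            if (((bpe_toks.map pvStrip).drop j0).take k).flatten = tokL
            then some (j', acc0 ++ List.replicate k o) else none
          rw [← hcur, if_neg hct]
        · rw [if_neg hz]

-- splitting a flattened run of pieces at a word boundary of matching length
theorem pvFlatten_split (P : List (List Char)) (j k1 j2 : Nat) (tokL restflat : List Char)
    (hj2 : j + k1 ≤ j2)
    (hlen1 : ((P.drop j).take k1).flatten.length = tokL.length) :
    (((P.drop j).take (j2 - j)).flatten = tokL ++ restflat
      ↔ ((P.drop j).take k1).flatten = tokL ∧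
        ((P.drop (j + k1)).take (j2 - (j + k1))).flatten = restflat) := by
  have hsplit : (P.drop j).take (j2 - j)
      = (P.drop j).take k1 ++ (P.drop (j + k1)).take (j2 - (j + k1)) := by
    have h : j2 - j = k1 + (j2 - (j + k1)) := by omega
    rw [h, List.take_add]
    congr 1
    rw [List.drop_drop]
  rw [hsplit, List.flatten_append]
  constructor
  · intro h
    exact List.append_inj h hlen1
  · rintro ⟨h1, h2⟩
    rw [h1, h2]

-- main induction over the remaining words
theorem pvAOuter_vs_pvBOuter (order : List Int) (bpe_toks : List String) :
    ∀ (rest : List String) (ti j : Nat) (acc : List Int),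
      pvAOuter order bpe_toks rest ti j acc =
        match pvBOuter (bpe_toks.map pvStrip) rest j [] with
        | none => none
        | some (counts, j') =>
          if (((bpe_toks.map pvStrip).drop j).take (j' - j)).flatten = (rest.map String.toList).flatten
             ∧ rest.length ≤ (order.drop ti).length
          then some (acc ++ ((order.drop ti).zip counts).flatMap (fun p => List.replicate p.2 p.1))
          else none := by
  intro rest
  induction rest with
  | nil =>
    intro ti j acc
    simp [pvAOuter, pvBOuter]
  | cons tok rest ih =>
    intro ti j acc
    rw [pvAOuter]
    cases hbj : bpe_toks[j]? with
    | none =>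
      have hb : PySem.List.pyGet? bpe_toks (j : Int) = none :=
        pvGet_none bpe_toks j (List.getElem?_eq_none_iff.mp hbj)
      have hp : (bpe_toks.map pvStrip)[j]? = none := by
        rw [List.getElem?_map, hbj]; rfl
      rw [hb, pvBOuter, pvSeg, if_pos (Or.inl rfl), hp]
    | some s =>
      have hjlt : j < bpe_toks.length := (List.getElem?_eq_some_iff.mp hbj).1
      have hsval : bpe_toks[j] = s := (List.getElem?_eq_some_iff.mp hbj).2
      have hb : PySem.List.pyGet? bpe_toks (j : Int) = some s := by
        simp [PySem.List.pyGet?_natCast, List.getElem?_eq_getElem hjlt, hsval]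
      have hp : (bpe_toks.map pvStrip)[j]? = some (pvStrip s) := by
        rw [List.getElem?_map, hbj]; rfl
      have hseg0 : pvSeg (bpe_toks.map pvStrip) j (tok.toList.length : Int) 0
          = pvSeg (bpe_toks.map pvStrip) (j + 1)
              ((tok.toList.length : Int) - ((pvStrip s).length : Int)) 1 := by
        rw [pvSeg, if_pos (Or.inl rfl), hp]
      have hcons : (bpe_toks.map pvStrip).drop j
          = pvStrip s :: (bpe_toks.map pvStrip).drop (j + 1) := by
        rw [List.drop_eq_getElem_cons (by simpa using hjlt)]
        congr 1
        simp [hsval]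
      -- if the first segment spells the word, its head piece is a prefix of the word
      have hsw_of_seg : ∀ k1 : Nat, 1 ≤ k1 →
          (((bpe_toks.map pvStrip).drop j).take k1).flatten = tok.toList →
          PySem.Chars.startswith tok.toList (pvStrip s) = true := by
        intro k1 hk1 hfl
        obtain ⟨m, rfl⟩ : ∃ m, k1 = m + 1 := ⟨k1 - 1, by omega⟩
        rw [hcons, List.take_succ_cons, List.flatten_cons] at hfl
        exact (PySem.Chars.startswith_iff _ _).mpr ⟨_, hfl⟩
      simp only [hb]
      rw [pvBOuter, hseg0]
      by_cases hsw : PySem.Chars.startswith tok.toList (pvStrip s) = true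
      · rw [if_pos hsw]
        cases ho : PySem.List.pyGet? order (ti : Int) with
        | none =>
          have hti : order.length ≤ ti := by
            by_contra hc
            push_neg at hc
            rw [PySem.List.pyGet?_natCast, List.getElem?_eq_getElem hc] at ho
            cases ho
          show (none : Option (List Int)) = _
          cases hs : pvSeg (bpe_toks.map pvStrip) (j + 1)
              ((tok.toList.length : Int) - ((pvStrip s).length : Int)) 1 with
          | none => rfl
          | some p =>
            obtain ⟨j1, k1⟩ := p
            simp only [hs]
            rw [pvBOuter_acc (bpe_toks.map pvStrip) rest j1 ([] ++ [k1])]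
            cases hBO : pvBOuter (bpe_toks.map pvStrip) rest j1 [] with
            | none => rfl
            | some q =>
              obtain ⟨cs, j2⟩ := q
              simp only [hBO, Option.map_some]
              have hz : ¬ (tok :: rest).length ≤ (order.drop ti).length := by
                simp only [List.length_cons, List.length_drop]
                omega
              simp [hz]
              intro _
              omega
        | some o =>
          have hti : ti < order.length := by
            by_contra hc
            push_neg at hc
            rw [PySem.List.pyGet?_natCast, List.getElem?_eq_none (by omega)] at ho
            cases ho
          have hoval : order[ti] = o := by
            rw [PySem.List.pyGet?_natCast, List.getElem?_eq_getElem hti] at ho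
            exact Option.some.inj ho
          have hdropo : order.drop ti = o :: order.drop (ti + 1) := by
            rw [List.drop_eq_getElem_cons hti, hoval]
          have hcur1 : pvStrip s = (((bpe_toks.map pvStrip).drop j).take 1).flatten := by
            rw [hcons]
            simp
          have hrep1 : acc ++ [o] = acc ++ List.replicate 1 o := by simp
          have hAW := pvAWhile_vs_pvSeg order bpe_toks tok.toList ti o ho j
            (bpe_toks.map pvStrip).length (j + 1) 1 (pvStrip s) acc (by omega) le_rfl hcur1
            (by omega) (by intro m h1 h2; omega)
          show (match pvAWhile order bpe_toks tok.toList ti (pvStrip s) (j + 1) (acc ++ [o]) with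
                | none => none
                | some (j', acc') => pvAOuter order bpe_toks rest (ti + 1) j' acc') = _
          rw [hrep1, hAW]
          cases hs : pvSeg (bpe_toks.map pvStrip) (j + 1)
              ((tok.toList.length : Int) - ((pvStrip s).length : Int)) 1 with
          | none => rfl
          | some p =>
            obtain ⟨j1, k1⟩ := p
            obtain ⟨-, hj1, hjle0, hlenEq⟩ :=
              pvSeg_facts (bpe_toks.map pvStrip) j (tok.toList.length : Int) 0 j1 k1
                (by rw [hseg0]; exact hs)
            obtain ⟨hk1, -, -, -⟩ :=
              pvSeg_facts (bpe_toks.map pvStrip) (j + 1) _ 1 j1 k1 hs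
            simp only [Nat.sub_zero] at hj1 hlenEq
            have hlen1 : (((bpe_toks.map pvStrip).drop j).take k1).flatten.length
                = tok.toList.length := by exact_mod_cast hlenEq.symm
            simp only [hs]
            by_cases hfl1 : (((bpe_toks.map pvStrip).drop j).take k1).flatten = tok.toList
            · rw [if_pos hfl1]
              show pvAOuter order bpe_toks rest (ti + 1) j1 (acc ++ List.replicate k1 o) = _
              rw [ih (ti + 1) j1 (acc ++ List.replicate k1 o)]
              rw [pvBOuter_acc (bpe_toks.map pvStrip) rest j1 ([] ++ [k1])]
              cases hBO : pvBOuter (bpe_toks.map pvStrip) rest j1 [] with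
              | none => rfl
              | some q =>
                obtain ⟨cs, j2⟩ := q
                simp only [hBO, Option.map_some, List.nil_append]
                have hmono := pvBOuter_mono (bpe_toks.map pvStrip) rest j1 [] cs j2 hBO
                have hsplit := pvFlatten_split (bpe_toks.map pvStrip) j k1 j2 tok.toList
                  ((rest.map String.toList).flatten) (by omega) hlen1
                simp only [List.map_cons, List.flatten_cons]
                by_cases hy : (((bpe_toks.map pvStrip).drop (j + k1)).take (j2 - (j + k1))).flatten
                    = (rest.map String.toList).flatten
                · by_cases hz : rest.length ≤ (order.drop (ti + 1)).length
                  · rw [if_pos ⟨by rw [hj1]; exact hy, hz⟩,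
                      if_pos ⟨hsplit.mpr ⟨hfl1, hy⟩, by
                        simp only [List.length_cons, List.length_drop] at hz ⊢; omega⟩]
                    rw [hdropo]
                    simp [List.append_assoc]
                  · rw [if_neg (by rintro ⟨-, h2⟩; exact hz h2),
                      if_neg (by
                        rintro ⟨-, h2⟩
                        apply hz
                        simp only [List.length_cons, List.length_drop] at h2 ⊢
                        omega)]
                · rw [if_neg (by rintro ⟨h1, -⟩; rw [hj1] at h1; exact hy h1),
                    if_neg (by rintro ⟨h1, -⟩; exact hy (hsplit.mp h1).2)]
            · rw [if_neg hfl1]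
              show (none : Option (List Int)) = _
              rw [pvBOuter_acc (bpe_toks.map pvStrip) rest j1 ([] ++ [k1])]
              cases hBO : pvBOuter (bpe_toks.map pvStrip) rest j1 [] with
              | none => rfl
              | some q =>
                obtain ⟨cs, j2⟩ := q
                simp only [hBO, Option.map_some]
                have hmono := pvBOuter_mono (bpe_toks.map pvStrip) rest j1 [] cs j2 hBO
                have hsplit := pvFlatten_split (bpe_toks.map pvStrip) j k1 j2 tok.toList
                  ((rest.map String.toList).flatten) (by omega) hlen1
                simp only [List.map_cons, List.flatten_cons]
                rw [if_neg (by rintro ⟨h1, -⟩; exact hfl1 (hsplit.mp h1).1)]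
      · rw [if_neg hsw]
        cases hs : pvSeg (bpe_toks.map pvStrip) (j + 1)
            ((tok.toList.length : Int) - ((pvStrip s).length : Int)) 1 with
        | none => rfl
        | some p =>
          obtain ⟨j1, k1⟩ := p
          obtain ⟨-, hj1, hjle0, hlenEq⟩ :=
            pvSeg_facts (bpe_toks.map pvStrip) j (tok.toList.length : Int) 0 j1 k1
              (by rw [hseg0]; exact hs)
          obtain ⟨hk1, -, -, -⟩ :=
            pvSeg_facts (bpe_toks.map pvStrip) (j + 1) _ 1 j1 k1 hs
          simp only [Nat.sub_zero] at hj1 hlenEq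
          have hlen1 : (((bpe_toks.map pvStrip).drop j).take k1).flatten.length
              = tok.toList.length := by exact_mod_cast hlenEq.symm
          simp only [hs]
          rw [pvBOuter_acc (bpe_toks.map pvStrip) rest j1 ([] ++ [k1])]
          cases hBO : pvBOuter (bpe_toks.map pvStrip) rest j1 [] with
          | none => rfl
          | some q =>
            obtain ⟨cs, j2⟩ := q
            simp only [hBO, Option.map_some]
            have hmono := pvBOuter_mono (bpe_toks.map pvStrip) rest j1 [] cs j2 hBO
            have hsplit := pvFlatten_split (bpe_toks.map pvStrip) j k1 j2 tok.toList
              ((rest.map String.toList).flatten) (by omega) hlen1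
            simp only [List.map_cons, List.flatten_cons]
            rw [if_neg (by
              rintro ⟨h1, -⟩
              exact hsw (hsw_of_seg k1 hk1 (hsplit.mp h1).1))]

-- ===== VERDICT (by name: the statement is the Claim_ definition above) =====
theorem get_new_reordering_spec : Claim_equal_get_new_reordering := by
  intro order toks bpe_toks _
  unfold Spec_get_new_reordering get_new_reordering get_new_reordering_alt
  rw [pvAOuter_vs_pvBOuter order bpe_toks toks 0 0 []]
  cases hB : pvBOuter (bpe_toks.map pvStrip) toks 0 [] with
  | none =>
    simp only [hB]
    by_cases h : order.length < toks.length <;> simp [h]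
  | some p =>
    obtain ⟨counts, j'⟩ := p
    simp only [hB, List.drop_zero, Nat.sub_zero]
    by_cases h : order.length < toks.length
    · have h2 : ¬ toks.length ≤ order.length := by omega
      simp [h, h2]
    · have h2 : toks.length ≤ order.length := by omega
      by_cases hfl : ((bpe_toks.map pvStrip).take j').flatten = (toks.map String.toList).flatten
      · simp [h, h2, hfl]
      · simp [h, h2, hfl]
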